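-- pv_equiv track=rewrite | github.com/Radcliffe/OEIS-Python | src/oeispy/A355/A355774.py | A355774_list
-- ===== SOURCE A (Python) =====
-- def A355774_list(upto: int) -> list[int]:
--     P: list[int] = []
--     for k in range(upto + 1):
--         if any(
--             k == ((n + n % 2) * (3 * n + 2 - n % 2)) >> 3
--             for n in range(k + 1)
--         ) or not any([(k - p) in P for p in P]):
--             P.append(k)
--     return P
-- ===== SOURCE B (Python) =====
-- def A355774_list(upto: int) -> list[int]:
--     P: list[int] = []
--     pent: set[int] = set()   # formula values f(n) for n = 0..k, built incrementally
--     sums: set[int] = set()   # all pairwise sums p+q of current members of P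
--     for k in range(upto + 1):
--         pent.add(((k + k % 2) * (3 * k + 2 - k % 2)) >> 3)
--         if k in pent or k not in sums:
--             for q in P:
--                 sums.add(k + q)
--             sums.add(k + k)
--             P.append(k)
--     return P
-- ===== Notes on version B (the rewrite author's own statement) =====
-- stated objective: faster
-- what changed: B maintains two incrementally-built sets - pent (the formula values f(n) for n seen so far) and sums (all pairwise sums of current members of P) - so each k is decided by two O(1) set-membership queries instead of A's per-k scan over range(k+1) and A's quadratic nested scan '(k-p) in P for p in P'.
import Mathlib
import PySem

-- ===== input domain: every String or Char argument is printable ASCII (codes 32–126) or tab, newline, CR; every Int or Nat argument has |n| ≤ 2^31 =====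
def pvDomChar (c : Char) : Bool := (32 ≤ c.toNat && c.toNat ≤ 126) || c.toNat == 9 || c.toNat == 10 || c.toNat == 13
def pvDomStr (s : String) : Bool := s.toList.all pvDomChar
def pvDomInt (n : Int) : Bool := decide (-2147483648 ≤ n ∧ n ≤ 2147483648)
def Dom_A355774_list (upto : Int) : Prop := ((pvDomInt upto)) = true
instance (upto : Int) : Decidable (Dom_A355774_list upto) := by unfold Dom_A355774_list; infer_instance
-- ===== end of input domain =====

-- B replaces A's per-k scan over range(k+1) and A's nested '(k-p) in P' scan by two
-- incrementally maintained sets (formula values seen so far; pairwise sums of P): faster.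

-- the formula ((n + n % 2) * (3 * n + 2 - n % 2)) >> 3, shared verbatim by both Pythons
def pvF (n : Int) : Int :=
  PySem.Int.floordiv ((n + PySem.Int.mod n 2) * (3 * n + 2 - PySem.Int.mod n 2)) 8

-- ===== PORT A =====
def pvStepA (P : List Int) (k : Int) : List Int :=
  if ((PySem.List.pyRange 0 (k + 1) 1).any (fun n => decide (k = pvF n)))
      || !(P.any (fun p => decide ((k - p) ∈ P))) then
    P ++ [k]
  else
    P

def A355774_list (upto : Int) : List Int :=
  (PySem.List.pyRange 0 (upto + 1) 1).foldl pvStepA []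

-- ===== PORT B =====
def pvStepB (st : List Int × PySem.Set Int × PySem.Set Int) (k : Int) :
    List Int × PySem.Set Int × PySem.Set Int :=
  if PySem.Set.contains (PySem.Set.add st.2.1 (pvF k)) k || !(PySem.Set.contains st.2.2 k) then
    (st.1 ++ [k], PySem.Set.add st.2.1 (pvF k),
      PySem.Set.add (st.1.foldl (fun s q => PySem.Set.add s (k + q)) st.2.2) (k + k))
  else
    (st.1, PySem.Set.add st.2.1 (pvF k), st.2.2)

def A355774_list_alt (upto : Int) : List Int :=
  ((PySem.List.pyRange 0 (upto + 1) 1).foldl pvStepB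
    (([] : List Int), (PySem.Set.empty : PySem.Set Int), (PySem.Set.empty : PySem.Set Int))).1

-- ===== PRECONDITION & SPEC =====
def Spec_A355774_list (upto : Int) (out : List Int) : Prop := out = A355774_list_alt upto
instance (upto : Int) (out : List Int) : Decidable (Spec_A355774_list upto out) := by
  unfold Spec_A355774_list; infer_instance

-- ===== CLAIM (what is proved, stated in full; the proofs are below) =====
def Claim_equal_A355774_list : Prop :=
  ∀ (upto : Int), Dom_A355774_list upto → Spec_A355774_list upto (A355774_list upto)

-- ===== LEMMAS AND PROOFS =====

-- joint loop invariant: after processing range(m), A's P equals B's P, B's pent set holds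
-- exactly the formula values pvF n for 0 ≤ n < m, and B's sums set holds exactly the
-- pairwise sums of the current members of P.
theorem pvInv (m : Nat) :
    ((PySem.List.pyRange 0 (m : Int) 1).foldl pvStepA [])
      = ((PySem.List.pyRange 0 (m : Int) 1).foldl pvStepB ([], PySem.Set.empty, PySem.Set.empty)).1 ∧
    (∀ x : Int,
      x ∈ ((PySem.List.pyRange 0 (m : Int) 1).foldl pvStepB ([], PySem.Set.empty, PySem.Set.empty)).2.1
        ↔ ∃ n : Int, 0 ≤ n ∧ n < (m : Int) ∧ x = pvF n) ∧
    (∀ x : Int,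
      x ∈ ((PySem.List.pyRange 0 (m : Int) 1).foldl pvStepB ([], PySem.Set.empty, PySem.Set.empty)).2.2
        ↔ ∃ p ∈ ((PySem.List.pyRange 0 (m : Int) 1).foldl pvStepB ([], PySem.Set.empty, PySem.Set.empty)).1,
          ∃ q ∈ ((PySem.List.pyRange 0 (m : Int) 1).foldl pvStepB ([], PySem.Set.empty, PySem.Set.empty)).1,
            x = p + q) := by
  induction m with
  | zero =>
      simp only [Nat.cast_zero]
      rw [PySem.List.pyRange_one_eq_nil (by omega : (0:Int) ≤ 0)]
      refine ⟨rfl, ?_, ?_⟩ <;> intro x <;> simp [PySem.Set.empty]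
      intro n h1 h2; omega
  | succ m ih =>
      obtain ⟨ihP, ihPent, ihSums⟩ := ih
      have hcast : ((m + 1 : Nat) : Int) = (m : Int) + 1 := by push_cast; ring
      rw [hcast, PySem.List.pyRange_one_succ_right (by positivity : (0:Int) ≤ (m:Int)),
        List.foldl_append, List.foldl_append]
      set PA := (PySem.List.pyRange 0 (m : Int) 1).foldl pvStepA [] with hPA
      set stB := (PySem.List.pyRange 0 (m : Int) 1).foldl pvStepB
        (([] : List Int), (PySem.Set.empty : PySem.Set Int), (PySem.Set.empty : PySem.Set Int)) with hstB
      simp only [List.foldl_cons, List.foldl_nil]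
      have hk : (0:Int) ≤ (m:Int) := by positivity
      -- the formula-check booleans of the two programs agree
      have hcondPent :
          ((PySem.List.pyRange 0 ((m:Int) + 1) 1).any (fun n => decide ((m:Int) = pvF n)))
            = PySem.Set.contains (PySem.Set.add stB.2.1 (pvF (m:Int))) (m:Int) := by
        apply Bool.eq_iff_iff.mpr
        simp only [List.any_eq_true, decide_eq_true_eq, PySem.Set.contains_iff,
          PySem.Set.mem_add, PySem.List.mem_pyRange_one, ihPent]
        constructor
        · rintro ⟨n, ⟨h0, h1⟩, he⟩
          by_cases hn : n = (m:Int)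
          · exact Or.inr (hn ▸ he)
          · exact Or.inl ⟨n, h0, by omega, he⟩
        · rintro (⟨n, h0, h1, he⟩ | he)
          · exact ⟨n, ⟨h0, by omega⟩, he⟩
          · exact ⟨(m:Int), ⟨hk, by omega⟩, he⟩
      -- the sum-check booleans of the two programs agree
      have hcondSum :
          (stB.1.any (fun p => decide (((m:Int) - p) ∈ stB.1)))
            = PySem.Set.contains stB.2.2 (m:Int) := by
        apply Bool.eq_iff_iff.mpr
        simp only [List.any_eq_true, decide_eq_true_eq, PySem.Set.contains_iff, ihSums]
        constructor
        · rintro ⟨p, hp, hq⟩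
          exact ⟨p, hp, (m:Int) - p, hq, by ring⟩
        · rintro ⟨p, hp, q, hq, he⟩
          refine ⟨p, hp, ?_⟩
          have hpq : (m:Int) - p = q := by omega
          rw [hpq]; exact hq
      -- the pent invariant holds in both branches
      have hPentNew : ∀ x : Int,
          x ∈ PySem.Set.add stB.2.1 (pvF (m:Int)) ↔ ∃ n : Int, 0 ≤ n ∧ n < (m:Int) + 1 ∧ x = pvF n := by
        intro x
        simp only [PySem.Set.mem_add, ihPent]
        constructor
        · rintro (⟨n, h0, h1, he⟩ | he)
          · exact ⟨n, h0, by omega, he⟩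
          · exact ⟨(m:Int), hk, by omega, he⟩
        · rintro ⟨n, h0, h1, he⟩
          by_cases hn : n = (m:Int)
          · exact Or.inr (hn ▸ he)
          · exact Or.inl ⟨n, h0, by omega, he⟩
      unfold pvStepA pvStepB
      rw [ihP, hcondPent, hcondSum]
      by_cases hc : (PySem.Set.contains (PySem.Set.add stB.2.1 (pvF (m:Int))) (m:Int)
          || !PySem.Set.contains stB.2.2 (m:Int)) = true
      · rw [if_pos hc, if_pos hc]
        refine ⟨rfl, fun x => hPentNew x, ?_⟩
        intro x
        simp only [PySem.Set.mem_add, PySem.Set.mem_foldl_add, ihSums, List.mem_append,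
          List.mem_singleton]
        constructor
        · rintro ((⟨p, hp, q, hq, he⟩ | ⟨q, hq, he⟩) | he)
          · exact ⟨p, Or.inl hp, q, Or.inl hq, he⟩
          · exact ⟨(m:Int), Or.inr rfl, q, Or.inl hq, by omega⟩
          · exact ⟨(m:Int), Or.inr rfl, (m:Int), Or.inr rfl, he⟩
        · rintro ⟨p, hp | hp, q, hq | hq, he⟩
          · exact Or.inl (Or.inl ⟨p, hp, q, hq, he⟩)
          · exact Or.inl (Or.inr ⟨p, hp, by omega⟩)
          · exact Or.inl (Or.inr ⟨q, hq, by omega⟩)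
          · exact Or.inr (by omega)
      · rw [if_neg hc, if_neg hc]
        exact ⟨rfl, fun x => hPentNew x, ihSums⟩

-- ===== VERDICT (by name: the statement is the Claim_ definition above) =====
theorem A355774_list_spec : Claim_equal_A355774_list := by
  intro upto _
  unfold Spec_A355774_list A355774_list A355774_list_alt
  by_cases h : upto + 1 ≤ 0
  · rw [PySem.List.pyRange_one_eq_nil h]
    rfl
  · have h0 : (0:Int) ≤ upto + 1 := by omega
    have : upto + 1 = ((upto + 1).toNat : Int) := by omega
    rw [this]
    exact (pvInv (upto + 1).toNat).1
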